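-- pv_equiv track=rewrite | github.com/tomipiriyev/Loko | Software/LokoGround Firmware/main.py | is_hex_ascii_convertible
-- ===== SOURCE A (Python) =====
-- def is_hex_ascii_convertible(hex_string):
--     if not all(c in '0123456789abcdefABCDEF' for c in hex_string):
--         return False
--
--     if len(hex_string) % 2 != 0:
--         return False
--
--     try:
--         decoded_bytes = bytes(int(hex_string[i:i+2], 16) for i in range(0, len(hex_string), 2))
--     except ValueError:
--         return False
--
--     return all(32 <= byte <= 126 for byte in decoded_bytes)
-- ===== SOURCE B (Python) =====
-- HEX_DIGITS = '0123456789abcdefABCDEF'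
--
-- def is_hex_ascii_convertible(hex_string):
--     if len(hex_string) % 2 != 0:
--         return False
--     it = iter(hex_string)
--     for c1 in it:
--         c2 = next(it)
--         if c1 not in HEX_DIGITS or c2 not in HEX_DIGITS:
--             return False
--         val = int(c1 + c2, 16)
--         if not (32 <= val <= 126):
--             return False
--     return True
-- ===== Notes on version B (the rewrite author's own statement) =====
-- stated objective: simpler
-- what changed: B replaces A's four separate passes (char-validity scan, parity check, full decode into a bytes object, range scan) by a single early-exit loop over character pairs that validates, decodes and range-checks each byte as it goes.
import Mathlib
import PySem

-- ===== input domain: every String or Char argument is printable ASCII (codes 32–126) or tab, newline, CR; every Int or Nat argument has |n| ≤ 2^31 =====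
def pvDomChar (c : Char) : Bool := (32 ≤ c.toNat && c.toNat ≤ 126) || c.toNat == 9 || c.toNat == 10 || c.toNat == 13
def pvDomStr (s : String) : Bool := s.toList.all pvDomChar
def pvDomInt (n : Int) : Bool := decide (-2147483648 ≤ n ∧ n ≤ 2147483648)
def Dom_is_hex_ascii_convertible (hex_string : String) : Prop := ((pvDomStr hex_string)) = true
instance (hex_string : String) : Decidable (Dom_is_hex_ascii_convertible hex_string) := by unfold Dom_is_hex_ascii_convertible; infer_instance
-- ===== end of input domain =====

-- B fuses A's four separate passes (hex-validity scan, parity check, decode, range scan)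
-- into one early-exit loop over character pairs; objective: simpler.

-- shared helpers: the value of int(pair, 16); exact for nonempty strings of hex digits,
-- the only inputs either Python feeds to int(·, 16) (both validate the characters first)
def pvHexDigits : List Char := "0123456789abcdefABCDEF".toList

def pvHexVal (c : Char) : Nat :=
  if c.toNat ≤ 57 then c.toNat - 48
  else if 97 ≤ c.toNat then c.toNat - 87
  else c.toNat - 55

def pvIntOfHex (cs : List Char) : Nat :=
  cs.foldl (fun acc c => 16 * acc + pvHexVal c) 0

-- ===== PORT A =====
def is_hex_ascii_convertible (hex_string : String) : Bool :=
  let cs := hex_string.toList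
  if !(cs.all (fun c => pvHexDigits.contains c)) then false
  else if cs.length % 2 ≠ 0 then false
  else
    -- int(hex_string[i:i+2], 16) for i in range(0, len, 2); the ValueError branch is
    -- unreachable here since every character was just validated as a hex digit
    let decoded := (PySem.List.pyRange 0 cs.length 2).map
      (fun i => pvIntOfHex (PySem.List.slice cs (some i) (some (i + 2))))
    decoded.all (fun b => 32 ≤ b && b ≤ 126)

-- ===== PORT B =====
-- the for-loop over the pair iterator of Source B, consuming two characters per step
def pvAltLoop : List Char → Bool
  | [] => true
  | [_] => false  -- unreachable after the even-length guard; needed for totality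
  | c1 :: c2 :: rest =>
    if !(pvHexDigits.contains c1) || !(pvHexDigits.contains c2) then false
    else
      let val := pvIntOfHex [c1, c2]
      if !(32 ≤ val && val ≤ 126) then false
      else pvAltLoop rest

def is_hex_ascii_convertible_alt (hex_string : String) : Bool :=
  if hex_string.toList.length % 2 ≠ 0 then false
  else pvAltLoop hex_string.toList

-- ===== PRECONDITION & SPEC =====
def Spec_is_hex_ascii_convertible (hex_string : String) (out : Bool) : Prop := out = is_hex_ascii_convertible_alt hex_string
instance (hex_string : String) (out : Bool) : Decidable (Spec_is_hex_ascii_convertible hex_string out) := by unfold Spec_is_hex_ascii_convertible; infer_instance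

-- ===== CLAIM (what is proved, stated in full; the proofs are below) =====
def Claim_equal_is_hex_ascii_convertible : Prop := ∀ (hex_string : String), Dom_is_hex_ascii_convertible hex_string → Spec_is_hex_ascii_convertible hex_string (is_hex_ascii_convertible hex_string)

-- ===== LEMMAS AND PROOFS =====

-- A's decoded list, as a named function (definitionally the expression inside port A)
def pvMapA (cs : List Char) : List Nat :=
  (PySem.List.pyRange 0 cs.length 2).map
    (fun i => pvIntOfHex (PySem.List.slice cs (some i) (some (i + 2))))

theorem pvMapA_range (cs : List Char) :
    pvMapA cs = (List.range (((cs.length : Int) + 1) / 2).toNat).map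
      (fun k : Nat => pvIntOfHex (PySem.List.slice cs (some ((2 * k : Nat) : Int))
        (some (((2 * k : Nat) : Int) + ((2 : Nat) : Int))))) := by
  unfold pvMapA
  rw [PySem.List.pyRange_of_pos 0 (cs.length : Int) (by norm_num : (0:Int) < 2)]
  rw [List.map_map]
  have hcount : (if (0:Int) < (cs.length : Int) then (((cs.length : Int) - 0 + 2 - 1) / 2).toNat else 0)
      = (((cs.length : Int) + 1) / 2).toNat := by
    split_ifs with h
    · omega
    · omega
  rw [hcount]
  apply List.map_congr_left
  intro k _
  simp only [Function.comp]
  push_cast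
  ring_nf

theorem pvMapA_cons (c1 c2 : Char) (rest : List Char) :
    pvMapA (c1 :: c2 :: rest) = pvIntOfHex [c1, c2] :: pvMapA rest := by
  rw [pvMapA_range, pvMapA_range]
  have hcnt : ((((c1 :: c2 :: rest).length : Int) + 1) / 2).toNat
      = (((rest.length : Int) + 1) / 2).toNat + 1 := by
    simp only [List.length_cons]; push_cast; omega
  rw [hcnt, List.range_succ_eq_map, List.map_cons, List.map_map]
  refine List.cons_eq_cons.mpr ⟨?_, ?_⟩
  · simp only [Nat.mul_zero]
    rw [PySem.List.slice_natCast_add (c1 :: c2 :: rest) 0 2]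
    rfl
  · apply List.map_congr_left
    intro k _
    simp only [Function.comp, Nat.succ_eq_add_one]
    rw [show (2 * (k + 1) : Nat) = (2 * k + 2 : Nat) from by ring]
    rw [PySem.List.slice_natCast_add, PySem.List.slice_natCast_add,
      show (2 * k + 2) = ((2 * k + 1) + 1) from rfl, List.drop_succ_cons, List.drop_succ_cons]

theorem pvAltLoop_nothex : (cs : List Char) →
    cs.all (fun c => pvHexDigits.contains c) = false → pvAltLoop cs = false
  | [], h => by simp at h
  | [_], _ => rfl
  | c1 :: c2 :: rest, h => by
    by_cases h1 : pvHexDigits.contains c1 = true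
    · by_cases h2 : pvHexDigits.contains c2 = true
      · have hrest : rest.all (fun c => pvHexDigits.contains c) = false := by
          simp only [List.all_cons, h1, h2, Bool.true_and] at h; exact h
        have h1m : c1 ∈ pvHexDigits := by simpa using h1
        have h2m : c2 ∈ pvHexDigits := by simpa using h2
        simp [pvAltLoop, h1m, h2m, pvAltLoop_nothex rest hrest]
      · have h2m : c2 ∉ pvHexDigits := by simpa using h2
        simp [pvAltLoop, h2m]
    · have h1m : c1 ∉ pvHexDigits := by simpa using h1
      simp [pvAltLoop, h1m]

theorem pvDecode_all : (cs : List Char) →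
    cs.all (fun c => pvHexDigits.contains c) = true → cs.length % 2 = 0 →
    (pvMapA cs).all (fun b => 32 ≤ b && b ≤ 126) = pvAltLoop cs
  | [], _, _ => by
    rw [pvMapA_range]; simp [pvAltLoop]
  | [_], _, hev => by simp at hev
  | c1 :: c2 :: rest, hhex, hev => by
    have h1 : pvHexDigits.contains c1 = true := by
      simp only [List.all_cons, Bool.and_eq_true] at hhex; exact hhex.1
    have h2 : pvHexDigits.contains c2 = true := by
      simp only [List.all_cons, Bool.and_eq_true] at hhex; exact hhex.2.1
    have hrest : rest.all (fun c => pvHexDigits.contains c) = true := by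
      simp only [List.all_cons, Bool.and_eq_true] at hhex; exact hhex.2.2
    have hevr : rest.length % 2 = 0 := by
      simp only [List.length_cons] at hev; omega
    rw [pvMapA_cons]
    simp only [pvAltLoop, h1, h2, Bool.not_true, Bool.or_self, Bool.false_eq_true, if_false,
      List.all_cons]
    by_cases hr : (32 ≤ pvIntOfHex [c1, c2] && pvIntOfHex [c1, c2] ≤ 126) = true
    · simp only [hr, Bool.not_true, Bool.false_eq_true, if_false, Bool.true_and]
      exact pvDecode_all rest hrest hevr
    · simp only [Bool.not_eq_true] at hr
      simp [hr]

-- ===== VERDICT (by name: the statement is the Claim_ definition above) =====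
theorem is_hex_ascii_convertible_spec : Claim_equal_is_hex_ascii_convertible := by
  intro s _
  unfold Spec_is_hex_ascii_convertible is_hex_ascii_convertible is_hex_ascii_convertible_alt
  show (if !(s.toList.all (fun c => pvHexDigits.contains c)) then false
        else if s.toList.length % 2 ≠ 0 then false
        else (pvMapA s.toList).all (fun b => 32 ≤ b && b ≤ 126))
      = (if s.toList.length % 2 ≠ 0 then false else pvAltLoop s.toList)
  split_ifs with h1 h2 h2
  · rfl
  · simp only [Bool.not_eq_true'] at h1
    exact (pvAltLoop_nothex s.toList h1).symm
  · rfl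
  · simp only [Bool.not_eq_true, Bool.not_eq_false'] at h1
    exact pvDecode_all s.toList h1 (by omega)
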